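-- pv_equiv track=rewrite | github.com/wso2/reference-implementations-afm | langchain-interpreter/src/langchain_interpreter/parser.py | _extract_role_and_instructions
-- ===== SOURCE A (Python) =====
-- def _extract_role_and_instructions(
--     lines: list[str], start_index: int
-- ) -> tuple[str, str]:
--     """Extract Role and Instructions sections from markdown body.
--
--     Looks for "# Role" and "# Instructions" headings and extracts
--     the content following each.
--
--     Args:
--         lines: List of lines from the AFM content.
--         start_index: Index to start searching from (after frontmatter).
--
--     Returns:
--         Tuple of (role_content, instructions_content).
--         Both are trimmed strings.
--     """
--     role_lines: list[str] = []
--     instructions_lines: list[str] = []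
--
--     in_role = False
--     in_instructions = False
--
--     for i in range(start_index, len(lines)):
--         line = lines[i]
--         stripped = line.strip()
--
--         # Check for heading
--         if stripped.startswith("# "):
--             heading = stripped[2:].lower()
--             if heading.startswith("role"):
--                 in_role = True
--                 in_instructions = False
--                 continue
--             elif heading.startswith("instructions"):
--                 in_role = False
--                 in_instructions = True
--                 continue
--             else:
--                 # Different heading - stop current section
--                 in_role = False
--                 in_instructions = False
--
--         # Add line to appropriate section
--         if in_role:
--             role_lines.append(line)
--         elif in_instructions:
--             instructions_lines.append(line)
--
--     role = "\n".join(role_lines).strip()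
--     instructions = "\n".join(instructions_lines).strip()
--
--     return role, instructions
-- ===== SOURCE B (Python) =====
-- def _extract_role_and_instructions(lines, start_index):
--     # Segment decomposition: split the suffix into heading-delimited segments,
--     # then select segments by heading keyword and join their bodies.
--     segments = []  # list of [keyword, body_lines]; lines before the first heading are discarded
--     current = None
--     for line in lines[start_index:]:
--         stripped = line.strip()
--         if stripped.startswith("# "):
--             current = [stripped[2:].lower(), []]
--             segments.append(current)
--         elif current is not None:
--             current[1].append(line)
--
--     def collect(prefix):
--         body = [l for kw, b in segments if kw.startswith(prefix) for l in b]
--         return "\n".join(body).strip()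
--
--     return collect("role"), collect("instructions")
-- ===== Notes on version B (the rewrite author's own statement) =====
-- stated objective: alternative
-- what changed: Replaced the stateful flag-machine (in_role/in_instructions booleans mutated per line) by a segment decomposition: one pass splits the suffix into heading-delimited segments, then the role/instructions contents are obtained by filtering segments on their heading keyword and joining their bodies. Pre_ excludes negative start_index, where A raises IndexError (start_index < -len) or accidentally re-reads trailing lines via negative-index wraparound.
-- outside the precondition, e.g. on _extract_role_and_instructions(['# Role', 'x'], -1): A returns ('x', ''), B returns ('', ''); on _extract_role_and_instructions(['x'], -2): A raises IndexError, B returns ('', '')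
import Mathlib
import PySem

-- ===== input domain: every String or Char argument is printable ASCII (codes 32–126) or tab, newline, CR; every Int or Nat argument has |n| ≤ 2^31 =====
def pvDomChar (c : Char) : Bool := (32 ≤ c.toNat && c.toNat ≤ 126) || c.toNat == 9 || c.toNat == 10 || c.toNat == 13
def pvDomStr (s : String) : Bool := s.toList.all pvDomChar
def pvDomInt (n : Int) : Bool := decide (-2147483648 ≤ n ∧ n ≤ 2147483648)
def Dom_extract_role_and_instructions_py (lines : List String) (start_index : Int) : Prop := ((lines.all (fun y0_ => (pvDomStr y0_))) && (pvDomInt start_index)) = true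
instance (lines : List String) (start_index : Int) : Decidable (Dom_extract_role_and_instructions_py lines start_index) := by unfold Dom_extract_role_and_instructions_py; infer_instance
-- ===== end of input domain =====

-- B replaces A's per-line boolean flag machine by a segment decomposition (split into
-- heading-delimited segments, then filter segments by heading keyword); same cost.

-- ===== PORT A =====
-- one loop step of A (state: role_lines, instructions_lines, in_role, in_instructions)
def pvStepA (st : List String × List String × Bool × Bool) (line : String) :
    List String × List String × Bool × Bool :=
  let stripped := PySem.Str.strip line
  if PySem.Str.startswith stripped "# " then
    let heading := PySem.Str.lower (PySem.Str.slice stripped (some 2) none)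
    if PySem.Str.startswith heading "role" then (st.1, st.2.1, true, false)
    else if PySem.Str.startswith heading "instructions" then (st.1, st.2.1, false, true)
    else (st.1, st.2.1, false, false)
  else
    if st.2.2.1 then (st.1 ++ [line], st.2.1, st.2.2.1, st.2.2.2)
    else if st.2.2.2 then (st.1, st.2.1 ++ [line], st.2.2.1, st.2.2.2)
    else st

-- the two final joins of A
def pvFinishA (st : List String × List String × Bool × Bool) : String × String :=
  (PySem.Str.strip (PySem.Str.join "\n" st.1), PySem.Str.strip (PySem.Str.join "\n" st.2.1))

def extract_role_and_instructions_py (lines : List String) (start_index : Int) : String × String :=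
  pvFinishA ((PySem.List.pyRange start_index (lines.length : Int) 1).foldl
    (fun st i => pvStepA st (PySem.List.pyGetD lines i "")) ([], [], false, false))

-- ===== PORT B =====
-- one loop step of B (state: segments in reverse order, head = current segment)
def pvStepB (segs : List (String × List String)) (line : String) :
    List (String × List String) :=
  let stripped := PySem.Str.strip line
  if PySem.Str.startswith stripped "# " then
    (PySem.Str.lower (PySem.Str.slice stripped (some 2) none), []) :: segs
  else
    match segs with
    | [] => []
    | (kw, body) :: rest => (kw, body ++ [line]) :: rest

-- bodies of the segments whose keyword starts with `pre`, in order
def pvCollect (segs : List (String × List String)) (pre : String) : String :=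
  PySem.Str.strip (PySem.Str.join "\n"
    ((segs.filter (fun s => PySem.Str.startswith s.1 pre)).flatMap (·.2)))

def pvFinishB (segs : List (String × List String)) : String × String :=
  (pvCollect segs "role", pvCollect segs "instructions")

def extract_role_and_instructions_py_alt (lines : List String) (start_index : Int) :
    String × String :=
  pvFinishB (((PySem.List.slice lines (some start_index) none).foldl pvStepB []).reverse)

-- ===== PRECONDITION & SPEC =====
-- Pre_ excludes negative start_index: there A raises IndexError when start_index < -len(lines),
-- and for -len ≤ start_index < 0 Python's negative-index wraparound makes A read the trailing
-- lines and then the whole list again — an accident of indexing, while B reads the plain suffix.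
def Pre_extract_role_and_instructions_py (lines : List String) (start_index : Int) : Prop :=
  0 ≤ start_index
instance (lines : List String) (start_index : Int) :
    Decidable (Pre_extract_role_and_instructions_py lines start_index) := by
  unfold Pre_extract_role_and_instructions_py; infer_instance

def pvWitness_extract_role_and_instructions_py : List String × Int :=
  (["# Role", "helpful", "# Instructions", "be brief"], 0)

def Spec_extract_role_and_instructions_py (lines : List String) (start_index : Int)
    (out : String × String) : Prop :=
  out = extract_role_and_instructions_py_alt lines start_index
instance (lines : List String) (start_index : Int) (out : String × String) :
    Decidable (Spec_extract_role_and_instructions_py lines start_index out) := by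
  unfold Spec_extract_role_and_instructions_py; infer_instance

-- ===== CLAIM (what is proved, stated in full; the proofs are below) =====
def Claim_equal_extract_role_and_instructions_py : Prop :=
  ∀ (lines : List String) (start_index : Int),
    Dom_extract_role_and_instructions_py lines start_index →
    Pre_extract_role_and_instructions_py lines start_index →
    Spec_extract_role_and_instructions_py lines start_index
      (extract_role_and_instructions_py lines start_index)

-- ===== LEMMAS AND PROOFS =====

-- flat body of the matching segments of a REVERSED segment list
def pvBody (segs : List (String × List String)) (pre : String) : List String :=
  (segs.reverse.filter (fun s => PySem.Str.startswith s.1 pre)).flatMap (·.2)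

-- head-keyword test on the reversed segment list (A's in_role / in_instructions flag)
def pvHead (segs : List (String × List String)) (pre : String) : Bool :=
  match segs with
  | [] => false
  | (kw, _) :: _ => PySem.Str.startswith kw pre

lemma pvBody_cons (kw : String) (segs : List (String × List String))
    (pre : String) (b : List String) :
    pvBody ((kw, b) :: segs) pre =
      pvBody segs pre ++ (if PySem.Str.startswith kw pre then b else []) := by
  simp only [pvBody, List.reverse_cons, List.filter_append, List.flatMap_append]
  congr 1
  by_cases h : PySem.Chars.startswith kw.toList pre.toList = true
  · simp [List.filter, h]
  · simp [List.filter, h]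

lemma pv_role_not_instr (kw : String) :
    PySem.Str.startswith kw "role" = true →
    PySem.Str.startswith kw "instructions" = false := by
  intro h
  by_contra hne
  have h2 : PySem.Str.startswith kw "instructions" = true := by
    cases hx : PySem.Str.startswith kw "instructions" <;> simp_all
  rw [PySem.Str.startswith_eq] at h h2
  have p1 := (PySem.Chars.startswith_iff _ _).mp h
  have p2 := (PySem.Chars.startswith_iff _ _).mp h2
  have e1 : "role".toList = 'r' :: "ole".toList := by decide
  have e2 : "instructions".toList = 'i' :: "nstructions".toList := by decide
  rw [e1] at p1; rw [e2] at p2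
  rcases p1 with ⟨t1, ht1⟩
  rcases p2 with ⟨t2, ht2⟩
  rw [← ht2] at ht1
  simp at ht1

-- one step: A's state stays determined by B's (reversed) segment list
lemma pvStepAB (segs : List (String × List String)) (l : String) :
    pvStepA (pvBody segs "role", pvBody segs "instructions",
             pvHead segs "role", pvHead segs "instructions") l =
      (pvBody (pvStepB segs l) "role", pvBody (pvStepB segs l) "instructions",
       pvHead (pvStepB segs l) "role", pvHead (pvStepB segs l) "instructions") := by
  by_cases hh : PySem.Str.startswith (PySem.Str.strip l) "# " = true
  · have hh' := hh; simp at hh'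
    have hb : ∀ pre, pvBody
        ((PySem.Str.lower (PySem.Str.slice (PySem.Str.strip l) (some 2) none),
          ([] : List String)) :: segs) pre = pvBody segs pre := by
      intro pre; rw [pvBody_cons]; split_ifs <;> simp
    by_cases hr : PySem.Str.startswith
        (PySem.Str.lower (PySem.Str.slice (PySem.Str.strip l) (some 2) none)) "role" = true
    · have hi := pv_role_not_instr _ hr
      have hr' := hr; have hi' := hi; simp at hr' hi'
      simp [pvStepA, pvStepB, hh', hr', hi', hb, pvHead]
    · by_cases hi : PySem.Str.startswith
          (PySem.Str.lower (PySem.Str.slice (PySem.Str.strip l) (some 2) none)) "instructions" = true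
      · have hr' := hr; have hi' := hi; simp at hr' hi'
        simp [pvStepA, pvStepB, hh', hr', hi', hb, pvHead]
      · have hr' := hr; have hi' := hi; simp at hr' hi'
        simp [pvStepA, pvStepB, hh', hr', hi', hb, pvHead]
  · have hh' := hh; simp at hh'
    cases segs with
    | nil => simp [pvStepA, pvStepB, hh', pvBody, pvHead]
    | cons s rest =>
      obtain ⟨kw, b⟩ := s
      by_cases hr : PySem.Str.startswith kw "role" = true
      · have hi := pv_role_not_instr _ hr
        have hr' := hr; have hi' := hi; simp at hr' hi'
        simp [pvStepA, pvStepB, hh', hr', hi', pvBody_cons, pvHead]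
      · by_cases hi : PySem.Str.startswith kw "instructions" = true
        · have hr' := hr; have hi' := hi; simp at hr' hi'
          simp [pvStepA, pvStepB, hh', hr', hi', pvBody_cons, pvHead]
        · have hr' := hr; have hi' := hi; simp at hr' hi'
          simp [pvStepA, pvStepB, hh', hr', hi', pvBody_cons, pvHead]

-- the loop invariant, folded over any list of lines
lemma pv_fold_inv (ls : List String) :
    ∀ segs : List (String × List String),
      ls.foldl pvStepA
        (pvBody segs "role", pvBody segs "instructions",
         pvHead segs "role", pvHead segs "instructions") =
      (pvBody (ls.foldl pvStepB segs) "role",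
       pvBody (ls.foldl pvStepB segs) "instructions",
       pvHead (ls.foldl pvStepB segs) "role",
       pvHead (ls.foldl pvStepB segs) "instructions") := by
  induction ls with
  | nil => intro segs; simp
  | cons l ls ih =>
    intro segs
    rw [List.foldl_cons, List.foldl_cons, pvStepAB, ih]

-- ===== VERDICT (by name: the statement is the Claim_ definition above) =====
theorem extract_role_and_instructions_py_spec :
    Claim_equal_extract_role_and_instructions_py := by
  intro lines start_index _hdom hpre
  unfold Spec_extract_role_and_instructions_py
  unfold extract_role_and_instructions_py extract_role_and_instructions_py_alt
  rw [PySem.List.foldl_pyRange_pyGetD' lines "" pvStepA ([], [], false, false) hpre,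
      PySem.List.slice_from lines hpre]
  have h := pv_fold_inv (lines.drop start_index.toNat) []
  have h0 : (pvBody ([] : List (String × List String)) "role",
      pvBody ([] : List (String × List String)) "instructions",
      pvHead ([] : List (String × List String)) "role",
      pvHead ([] : List (String × List String)) "instructions") =
      (([] : List String), ([] : List String), false, false) := by
    simp [pvBody, pvHead]
  rw [h0] at h
  rw [h]
  simp [pvFinishA, pvFinishB, pvCollect, pvBody]
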